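-- pv_equiv track=rewrite | github.com/adorogensky/sandbox | python/problems/p013_month_days.py | _month_days
-- ===== SOURCE A (Python) =====
-- def _is_leap_year(year: int) -> int:
--     if year % 4 != 0: return False
--     if year % 100 != 0: return True
--     return True if year % 400 == 0 else False
--
-- def _month_days(year: int, month: int, b4_aug: bool) -> int:
--     if month > 7:
--         return _month_days(year, month - 7, b4_aug)
--     if month % 2 == 0:
--         if month == 2 and b4_aug:
--             return 29 if _is_leap_year(year) else 28
--         else:
--             return 30
--     else:
--         return 31
-- ===== SOURCE B (Python) =====
-- def _month_days(year: int, month: int, b4_aug: bool) -> int: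
--     # closed-form reduction instead of repeated-subtraction recursion
--     m = month if month <= 7 else (month - 8) % 7 + 1
--     if m == 2 and b4_aug:
--         return 29 if year % 4 == 0 and (year % 100 != 0 or year % 400 == 0) else 28
--     return 30 if m % 2 == 0 else 31
-- ===== Notes on version B (the rewrite author's own statement) =====
-- stated objective: faster
-- what changed: Replaces the repeated-subtraction recursion (month -= 7 until month <= 7) with a closed-form modular reduction (month-8) % 7 + 1 and inlines the leap-year test into one boolean expression.
-- outside the precondition, e.g. on _month_days(2000, 6950, True): A returns 30, B returns 30; on _month_days(2000, 100000, True): A raises RecursionError, B returns 31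
-- crash fix: For large months (above roughly 6986 at CPython's default recursion limit) A's month-7 recursion exceeds the stack and raises RecursionError, while B returns the same parity-based day count in O(1); Raises_ covers month > 6900. — e.g. on _month_days(2000, 100000, true): A raises RecursionError, B returns 31
import Mathlib
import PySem

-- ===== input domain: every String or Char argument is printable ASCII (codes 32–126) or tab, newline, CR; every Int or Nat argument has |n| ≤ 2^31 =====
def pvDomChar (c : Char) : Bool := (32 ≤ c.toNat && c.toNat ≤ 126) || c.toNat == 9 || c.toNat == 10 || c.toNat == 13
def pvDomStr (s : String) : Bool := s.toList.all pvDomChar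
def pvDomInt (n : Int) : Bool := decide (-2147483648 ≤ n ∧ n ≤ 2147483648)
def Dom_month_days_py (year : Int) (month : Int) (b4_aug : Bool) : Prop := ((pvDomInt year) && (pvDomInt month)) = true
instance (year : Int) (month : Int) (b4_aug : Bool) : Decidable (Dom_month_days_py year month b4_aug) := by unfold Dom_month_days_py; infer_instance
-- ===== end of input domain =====

-- B replaces A's month-by-month subtraction recursion with a closed-form modular
-- reduction (and inlines the leap-year test); equal to A wherever A returns inside Pre_.

-- ===== PORT A =====
def is_leap_year_py (year : Int) : Bool :=
  if PySem.Int.mod year 4 ≠ 0 then false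
  else if PySem.Int.mod year 100 ≠ 0 then true
  else if PySem.Int.mod year 400 = 0 then true else false

def month_days_py (year : Int) (month : Int) (b4_aug : Bool) : Int :=
  if month > 7 then month_days_py year (month - 7) b4_aug
  else if PySem.Int.mod month 2 = 0 then
    (if month = 2 ∧ b4_aug then (if is_leap_year_py year then 29 else 28) else 30)
  else 31
termination_by month.toNat
decreasing_by omega

-- ===== PORT B =====
def month_days_py_alt (year : Int) (month : Int) (b4_aug : Bool) : Int :=
  let m : Int := if month ≤ 7 then month else PySem.Int.mod (month - 8) 7 + 1
  if m = 2 ∧ b4_aug then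
    (if PySem.Int.mod year 4 = 0 ∧ (PySem.Int.mod year 100 ≠ 0 ∨ PySem.Int.mod year 400 = 0)
     then 29 else 28)
  else if PySem.Int.mod m 2 = 0 then 30 else 31

-- ===== PRECONDITION & SPEC =====
-- Pre_ excludes months above 6900, where A's depth-(month-7)/7 recursion exceeds CPython's
-- default stack and raises RecursionError (measured threshold ≈ 6986 at recursion limit
-- 1000; the small band 6901..threshold, where A still returns and B agrees, is excluded
-- only because the exact raising point varies with interpreter stack state).
def Pre_month_days_py (year : Int) (month : Int) (b4_aug : Bool) : Prop := month ≤ 6900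
instance (year : Int) (month : Int) (b4_aug : Bool) : Decidable (Pre_month_days_py year month b4_aug) := by unfold Pre_month_days_py; infer_instance
def pvWitness_month_days_py : Int × Int × Bool := (2024, 2, true)

-- For months above the stack threshold A raises RecursionError while B returns the
-- parity-based day count; Raises_ covers month > 6900 (all of it outside Pre_).
def Raises_month_days_py (year : Int) (month : Int) (b4_aug : Bool) : Prop := month > 6900
instance (year : Int) (month : Int) (b4_aug : Bool) : Decidable (Raises_month_days_py year month b4_aug) := by unfold Raises_month_days_py; infer_instance
def pvRaiseWitness_month_days_py : Int × Int × Bool := (2000, 100000, true)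
def pvRaiseWitnessOut_month_days_py : Int := 31

def Spec_month_days_py (year : Int) (month : Int) (b4_aug : Bool) (out : Int) : Prop := out = month_days_py_alt year month b4_aug
instance (year : Int) (month : Int) (b4_aug : Bool) (out : Int) : Decidable (Spec_month_days_py year month b4_aug out) := by unfold Spec_month_days_py; infer_instance

-- ===== CLAIM (what is proved, stated in full; the proofs are below) =====
def Claim_equal_month_days_py : Prop := ∀ (year : Int) (month : Int) (b4_aug : Bool), Dom_month_days_py year month b4_aug → Pre_month_days_py year month b4_aug → Spec_month_days_py year month b4_aug (month_days_py year month b4_aug)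
def Claim_raises_month_days_py : Prop := (∀ (year : Int) (month : Int) (b4_aug : Bool), Dom_month_days_py year month b4_aug → Raises_month_days_py year month b4_aug → ¬ Pre_month_days_py year month b4_aug) ∧ (Dom_month_days_py (pvRaiseWitness_month_days_py.1) (pvRaiseWitness_month_days_py.2.1) (pvRaiseWitness_month_days_py.2.2) ∧ Raises_month_days_py (pvRaiseWitness_month_days_py.1) (pvRaiseWitness_month_days_py.2.1) (pvRaiseWitness_month_days_py.2.2) ∧ month_days_py_alt (pvRaiseWitness_month_days_py.1) (pvRaiseWitness_month_days_py.2.1) (pvRaiseWitness_month_days_py.2.2) = pvRaiseWitnessOut_month_days_py)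

-- ===== LEMMAS AND PROOFS =====

-- B's port is invariant under one reduction step month ↦ month - 7 (for month > 7).
theorem alt_step (year : Int) (month : Int) (b4_aug : Bool) (h : month > 7) :
    month_days_py_alt year month b4_aug = month_days_py_alt year (month - 7) b4_aug := by
  unfold month_days_py_alt
  have hm : (if month ≤ 7 then month else PySem.Int.mod (month - 8) 7 + 1)
      = (if month - 7 ≤ 7 then month - 7 else PySem.Int.mod (month - 7 - 8) 7 + 1) := by
    simp only [PySem.Int.mod_eq_emod_of_pos (a := month - 8) (by omega : (0:Int) < 7),
      PySem.Int.mod_eq_emod_of_pos (a := month - 7 - 8) (by omega : (0:Int) < 7)]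
    split_ifs with h1 h2 h3 <;> omega
  rw [hm]

-- On the base case (month ≤ 7) the two ports branch to the same value.
theorem eq_base (year : Int) (month : Int) (b4_aug : Bool) (h : ¬ month > 7) :
    month_days_py year month b4_aug = month_days_py_alt year month b4_aug := by
  rw [month_days_py]
  unfold month_days_py_alt is_leap_year_py
  simp only [PySem.Int.mod_eq_emod_of_pos (by norm_num : (0:Int) < 2),
    PySem.Int.mod_eq_emod_of_pos (by norm_num : (0:Int) < 4),
    PySem.Int.mod_eq_emod_of_pos (by norm_num : (0:Int) < 100),
    PySem.Int.mod_eq_emod_of_pos (by norm_num : (0:Int) < 400),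
    if_neg h, if_pos (show month ≤ 7 by omega)]
  split_ifs <;> first | omega | simp_all

theorem eq_all (year : Int) (month : Int) (b4_aug : Bool) :
    month_days_py year month b4_aug = month_days_py_alt year month b4_aug := by
  by_cases h : month > 7
  · rw [month_days_py]
    simp only [if_pos h]
    rw [alt_step year month b4_aug h]
    exact eq_all year (month - 7) b4_aug
  · exact eq_base year month b4_aug h
termination_by month.toNat
decreasing_by omega

-- ===== VERDICT (by name: the statement is the Claim_ definition above) =====
theorem month_days_py_spec : Claim_equal_month_days_py := by
  intro year month b4_aug _ _
  unfold Spec_month_days_py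
  exact eq_all year month b4_aug

@[simp] theorem month_days_py_raises : Claim_raises_month_days_py := by
  unfold Claim_raises_month_days_py
  exact ⟨by intro y m f _ h hp; unfold Raises_month_days_py at h; unfold Pre_month_days_py at hp; omega, by decide⟩
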